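-- pv_equiv track=rewrite | github.com/mtp13/weather | api/weather.py | get_worst_weather_code
-- ===== SOURCE A (Python) =====
-- def get_worst_weather_code(codes):
--     """Get the most significant weather code (worst-case)."""
--     priority = {
--         99: 10,  # Thunderstorm with heavy hail
--         96: 9,  # Thunderstorm with slight hail
--         95: 8,  # Thunderstorm
--         82: 7,  # Violent rain showers
--         81: 6,  # Rain showers
--         80: 5,  # Slight rain showers
--         67: 4,  # Heavy freezing rain
--         66: 3,  # Freezing rain
--         65: 2,  # Heavy rain
--         63: 1,  # Rain
--         61: 0,  # Slight rain
--     }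
--
--     max_priority = -1
--     worst_code = codes[0] if len(codes) > 0 else 0
--
--     for code in codes:
--         if code in priority and priority[code] > max_priority:
--             max_priority = priority[code]
--             worst_code = code
--
--     return worst_code
-- ===== SOURCE B (Python) =====
-- def get_worst_weather_code(codes):
--     """Get the most significant weather code (worst-case)."""
--     # known codes in descending order of severity
--     table = [99, 96, 95, 82, 81, 80, 67, 66, 65, 63, 61]
--     present = set(codes)
--     for t in table:
--         if t in present:
--             return t
--     return codes[0] if codes else 0
-- ===== Notes on version B (the rewrite author's own statement) =====
-- stated objective: idiomatic
-- what changed: Instead of scanning the input while maintaining a running max-priority accumulator against a dict, B builds a set of the input once and scans a fixed descending-severity table, returning the first table code present (fallback codes[0] / 0 unchanged).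
import Mathlib
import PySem

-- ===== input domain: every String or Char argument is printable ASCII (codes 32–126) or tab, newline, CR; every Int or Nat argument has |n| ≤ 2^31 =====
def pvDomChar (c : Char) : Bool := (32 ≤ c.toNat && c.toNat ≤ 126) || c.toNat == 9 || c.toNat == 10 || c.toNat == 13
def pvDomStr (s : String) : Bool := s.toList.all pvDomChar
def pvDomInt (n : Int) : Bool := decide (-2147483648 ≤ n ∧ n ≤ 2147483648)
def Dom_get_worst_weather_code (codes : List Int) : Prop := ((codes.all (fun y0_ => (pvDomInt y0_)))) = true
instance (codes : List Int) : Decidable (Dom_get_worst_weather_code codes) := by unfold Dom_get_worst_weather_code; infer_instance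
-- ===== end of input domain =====

-- B replaces A's running max-priority scan of the input against a priority dict by a
-- single set() of the input plus a scan of a fixed descending-severity table (idiomatic; same cost).

-- ===== PORT A =====
def pvPriority : PySem.Dict Int Int :=
  PySem.Dict.ofList [(99,10),(96,9),(95,8),(82,7),(81,6),(80,5),(67,4),(66,3),(65,2),(63,1),(61,0)]

-- the loop body: 'if code in priority and priority[code] > max_priority: …'
def pvStep (s : Int × Int) (code : Int) : Int × Int :=
  if pvPriority.contains code && decide (pvPriority.getD code 0 > s.1)
  then (pvPriority.getD code 0, code) else s

def get_worst_weather_code (codes : List Int) : Int :=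
  let worst_code : Int := if PySem.List.len codes > 0 then PySem.List.pyGetD codes 0 0 else 0
  (codes.foldl pvStep (-1, worst_code)).2

-- ===== PORT B =====
def get_worst_weather_code_alt (codes : List Int) : Int :=
  let present : PySem.Set Int := PySem.Set.ofList codes
  match ([99, 96, 95, 82, 81, 80, 67, 66, 65, 63, 61] : List Int).find?
          (fun t => PySem.Set.contains present t) with
  | some t => t
  | none => if codes = [] then 0 else PySem.List.pyGetD codes 0 0

-- ===== PRECONDITION & SPEC =====
def Spec_get_worst_weather_code (codes : List Int) (out : Int) : Prop := out = get_worst_weather_code_alt codes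
instance (codes : List Int) (out : Int) : Decidable (Spec_get_worst_weather_code codes out) := by unfold Spec_get_worst_weather_code; infer_instance

-- ===== CLAIM (what is proved, stated in full; the proofs are below) =====
def Claim_equal_get_worst_weather_code : Prop := ∀ (codes : List Int), Dom_get_worst_weather_code codes → Spec_get_worst_weather_code codes (get_worst_weather_code codes)

-- ===== LEMMAS AND PROOFS =====

-- Selector characterising A's fold from state (mp, wc): first table code present in
-- `codes` whose priority exceeds `mp`, else `wc`.
def pvSel (codes : List Int) (mp wc : Int) : Int :=
  if 99 ∈ codes ∧ 10 > mp then 99 else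
  if 96 ∈ codes ∧ 9 > mp then 96 else
  if 95 ∈ codes ∧ 8 > mp then 95 else
  if 82 ∈ codes ∧ 7 > mp then 82 else
  if 81 ∈ codes ∧ 6 > mp then 81 else
  if 80 ∈ codes ∧ 5 > mp then 80 else
  if 67 ∈ codes ∧ 4 > mp then 67 else
  if 66 ∈ codes ∧ 3 > mp then 66 else
  if 65 ∈ codes ∧ 2 > mp then 65 else
  if 63 ∈ codes ∧ 1 > mp then 63 else
  if 61 ∈ codes ∧ 0 > mp then 61 else wc

lemma pvLoop_sel (codes : List Int) : ∀ (mp wc : Int),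
    (codes.foldl pvStep (mp, wc)).2 = pvSel codes mp wc := by
  induction codes with
  | nil => intro mp wc; simp [pvSel]
  | cons c cs ih =>
    intro mp wc
    by_cases h99 : c = 99
    · subst h99
      have hstep : pvStep (mp, wc) 99 = if 10 > mp then ((10:Int), 99) else (mp, wc) := by
        rw [pvStep, show pvPriority.contains 99 = true from rfl,
            show pvPriority.getD 99 0 = 10 from rfl]
        simp
      rw [List.foldl_cons, hstep]
      by_cases hc : (10:Int) > mp
      · rw [if_pos hc, ih 10 99]
        simp [pvSel, List.mem_cons,  hc]
      · rw [if_neg hc, ih mp wc]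
        have hb9 : ¬((9:Int) > mp) := by omega
        have hb8 : ¬((8:Int) > mp) := by omega
        have hb7 : ¬((7:Int) > mp) := by omega
        have hb6 : ¬((6:Int) > mp) := by omega
        have hb5 : ¬((5:Int) > mp) := by omega
        have hb4 : ¬((4:Int) > mp) := by omega
        have hb3 : ¬((3:Int) > mp) := by omega
        have hb2 : ¬((2:Int) > mp) := by omega
        have hb1 : ¬((1:Int) > mp) := by omega
        have hb0 : ¬((0:Int) > mp) := by omega
        simp [pvSel, List.mem_cons, hb9, hb8, hb7, hb6, hb5, hb4, hb3, hb2, hb1, hb0, hc]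
    by_cases h96 : c = 96
    · subst h96
      have hstep : pvStep (mp, wc) 96 = if 9 > mp then ((9:Int), 96) else (mp, wc) := by
        rw [pvStep, show pvPriority.contains 96 = true from rfl,
            show pvPriority.getD 96 0 = 9 from rfl]
        simp
      rw [List.foldl_cons, hstep]
      by_cases hc : (9:Int) > mp
      · rw [if_pos hc, ih 9 96]
        have ha10 : (10:Int) > mp := by omega
        simp [pvSel, List.mem_cons, ha10, hc]
      · rw [if_neg hc, ih mp wc]
        have hb8 : ¬((8:Int) > mp) := by omega
        have hb7 : ¬((7:Int) > mp) := by omega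
        have hb6 : ¬((6:Int) > mp) := by omega
        have hb5 : ¬((5:Int) > mp) := by omega
        have hb4 : ¬((4:Int) > mp) := by omega
        have hb3 : ¬((3:Int) > mp) := by omega
        have hb2 : ¬((2:Int) > mp) := by omega
        have hb1 : ¬((1:Int) > mp) := by omega
        have hb0 : ¬((0:Int) > mp) := by omega
        simp [pvSel, List.mem_cons, hb8, hb7, hb6, hb5, hb4, hb3, hb2, hb1, hb0, hc]
    by_cases h95 : c = 95
    · subst h95
      have hstep : pvStep (mp, wc) 95 = if 8 > mp then ((8:Int), 95) else (mp, wc) := by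
        rw [pvStep, show pvPriority.contains 95 = true from rfl,
            show pvPriority.getD 95 0 = 8 from rfl]
        simp
      rw [List.foldl_cons, hstep]
      by_cases hc : (8:Int) > mp
      · rw [if_pos hc, ih 8 95]
        have ha10 : (10:Int) > mp := by omega
        have ha9 : (9:Int) > mp := by omega
        simp [pvSel, List.mem_cons, ha10, ha9, hc]
      · rw [if_neg hc, ih mp wc]
        have hb7 : ¬((7:Int) > mp) := by omega
        have hb6 : ¬((6:Int) > mp) := by omega
        have hb5 : ¬((5:Int) > mp) := by omega
        have hb4 : ¬((4:Int) > mp) := by omega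
        have hb3 : ¬((3:Int) > mp) := by omega
        have hb2 : ¬((2:Int) > mp) := by omega
        have hb1 : ¬((1:Int) > mp) := by omega
        have hb0 : ¬((0:Int) > mp) := by omega
        simp [pvSel, List.mem_cons, hb7, hb6, hb5, hb4, hb3, hb2, hb1, hb0, hc]
    by_cases h82 : c = 82
    · subst h82
      have hstep : pvStep (mp, wc) 82 = if 7 > mp then ((7:Int), 82) else (mp, wc) := by
        rw [pvStep, show pvPriority.contains 82 = true from rfl,
            show pvPriority.getD 82 0 = 7 from rfl]
        simp
      rw [List.foldl_cons, hstep]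
      by_cases hc : (7:Int) > mp
      · rw [if_pos hc, ih 7 82]
        have ha10 : (10:Int) > mp := by omega
        have ha9 : (9:Int) > mp := by omega
        have ha8 : (8:Int) > mp := by omega
        simp [pvSel, List.mem_cons, ha10, ha9, ha8, hc]
      · rw [if_neg hc, ih mp wc]
        have hb6 : ¬((6:Int) > mp) := by omega
        have hb5 : ¬((5:Int) > mp) := by omega
        have hb4 : ¬((4:Int) > mp) := by omega
        have hb3 : ¬((3:Int) > mp) := by omega
        have hb2 : ¬((2:Int) > mp) := by omega
        have hb1 : ¬((1:Int) > mp) := by omega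
        have hb0 : ¬((0:Int) > mp) := by omega
        simp [pvSel, List.mem_cons, hb6, hb5, hb4, hb3, hb2, hb1, hb0, hc]
    by_cases h81 : c = 81
    · subst h81
      have hstep : pvStep (mp, wc) 81 = if 6 > mp then ((6:Int), 81) else (mp, wc) := by
        rw [pvStep, show pvPriority.contains 81 = true from rfl,
            show pvPriority.getD 81 0 = 6 from rfl]
        simp
      rw [List.foldl_cons, hstep]
      by_cases hc : (6:Int) > mp
      · rw [if_pos hc, ih 6 81]
        have ha10 : (10:Int) > mp := by omega
        have ha9 : (9:Int) > mp := by omega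
        have ha8 : (8:Int) > mp := by omega
        have ha7 : (7:Int) > mp := by omega
        simp [pvSel, List.mem_cons, ha10, ha9, ha8, ha7, hc]
      · rw [if_neg hc, ih mp wc]
        have hb5 : ¬((5:Int) > mp) := by omega
        have hb4 : ¬((4:Int) > mp) := by omega
        have hb3 : ¬((3:Int) > mp) := by omega
        have hb2 : ¬((2:Int) > mp) := by omega
        have hb1 : ¬((1:Int) > mp) := by omega
        have hb0 : ¬((0:Int) > mp) := by omega
        simp [pvSel, List.mem_cons, hb5, hb4, hb3, hb2, hb1, hb0, hc]
    by_cases h80 : c = 80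
    · subst h80
      have hstep : pvStep (mp, wc) 80 = if 5 > mp then ((5:Int), 80) else (mp, wc) := by
        rw [pvStep, show pvPriority.contains 80 = true from rfl,
            show pvPriority.getD 80 0 = 5 from rfl]
        simp
      rw [List.foldl_cons, hstep]
      by_cases hc : (5:Int) > mp
      · rw [if_pos hc, ih 5 80]
        have ha10 : (10:Int) > mp := by omega
        have ha9 : (9:Int) > mp := by omega
        have ha8 : (8:Int) > mp := by omega
        have ha7 : (7:Int) > mp := by omega
        have ha6 : (6:Int) > mp := by omega
        simp [pvSel, List.mem_cons, ha10, ha9, ha8, ha7, ha6, hc]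
      · rw [if_neg hc, ih mp wc]
        have hb4 : ¬((4:Int) > mp) := by omega
        have hb3 : ¬((3:Int) > mp) := by omega
        have hb2 : ¬((2:Int) > mp) := by omega
        have hb1 : ¬((1:Int) > mp) := by omega
        have hb0 : ¬((0:Int) > mp) := by omega
        simp [pvSel, List.mem_cons, hb4, hb3, hb2, hb1, hb0, hc]
    by_cases h67 : c = 67
    · subst h67
      have hstep : pvStep (mp, wc) 67 = if 4 > mp then ((4:Int), 67) else (mp, wc) := by
        rw [pvStep, show pvPriority.contains 67 = true from rfl,
            show pvPriority.getD 67 0 = 4 from rfl]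
        simp
      rw [List.foldl_cons, hstep]
      by_cases hc : (4:Int) > mp
      · rw [if_pos hc, ih 4 67]
        have ha10 : (10:Int) > mp := by omega
        have ha9 : (9:Int) > mp := by omega
        have ha8 : (8:Int) > mp := by omega
        have ha7 : (7:Int) > mp := by omega
        have ha6 : (6:Int) > mp := by omega
        have ha5 : (5:Int) > mp := by omega
        simp [pvSel, List.mem_cons, ha10, ha9, ha8, ha7, ha6, ha5, hc]
      · rw [if_neg hc, ih mp wc]
        have hb3 : ¬((3:Int) > mp) := by omega
        have hb2 : ¬((2:Int) > mp) := by omega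
        have hb1 : ¬((1:Int) > mp) := by omega
        have hb0 : ¬((0:Int) > mp) := by omega
        simp [pvSel, List.mem_cons, hb3, hb2, hb1, hb0, hc]
    by_cases h66 : c = 66
    · subst h66
      have hstep : pvStep (mp, wc) 66 = if 3 > mp then ((3:Int), 66) else (mp, wc) := by
        rw [pvStep, show pvPriority.contains 66 = true from rfl,
            show pvPriority.getD 66 0 = 3 from rfl]
        simp
      rw [List.foldl_cons, hstep]
      by_cases hc : (3:Int) > mp
      · rw [if_pos hc, ih 3 66]
        have ha10 : (10:Int) > mp := by omega
        have ha9 : (9:Int) > mp := by omega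
        have ha8 : (8:Int) > mp := by omega
        have ha7 : (7:Int) > mp := by omega
        have ha6 : (6:Int) > mp := by omega
        have ha5 : (5:Int) > mp := by omega
        have ha4 : (4:Int) > mp := by omega
        simp [pvSel, List.mem_cons, ha10, ha9, ha8, ha7, ha6, ha5, ha4, hc]
      · rw [if_neg hc, ih mp wc]
        have hb2 : ¬((2:Int) > mp) := by omega
        have hb1 : ¬((1:Int) > mp) := by omega
        have hb0 : ¬((0:Int) > mp) := by omega
        simp [pvSel, List.mem_cons, hb2, hb1, hb0, hc]
    by_cases h65 : c = 65
    · subst h65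
      have hstep : pvStep (mp, wc) 65 = if 2 > mp then ((2:Int), 65) else (mp, wc) := by
        rw [pvStep, show pvPriority.contains 65 = true from rfl,
            show pvPriority.getD 65 0 = 2 from rfl]
        simp
      rw [List.foldl_cons, hstep]
      by_cases hc : (2:Int) > mp
      · rw [if_pos hc, ih 2 65]
        have ha10 : (10:Int) > mp := by omega
        have ha9 : (9:Int) > mp := by omega
        have ha8 : (8:Int) > mp := by omega
        have ha7 : (7:Int) > mp := by omega
        have ha6 : (6:Int) > mp := by omega
        have ha5 : (5:Int) > mp := by omega
        have ha4 : (4:Int) > mp := by omega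
        have ha3 : (3:Int) > mp := by omega
        simp [pvSel, List.mem_cons, ha10, ha9, ha8, ha7, ha6, ha5, ha4, ha3, hc]
      · rw [if_neg hc, ih mp wc]
        have hb1 : ¬((1:Int) > mp) := by omega
        have hb0 : ¬((0:Int) > mp) := by omega
        simp [pvSel, List.mem_cons, hb1, hb0, hc]
    by_cases h63 : c = 63
    · subst h63
      have hstep : pvStep (mp, wc) 63 = if 1 > mp then ((1:Int), 63) else (mp, wc) := by
        rw [pvStep, show pvPriority.contains 63 = true from rfl,
            show pvPriority.getD 63 0 = 1 from rfl]
        simp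
      rw [List.foldl_cons, hstep]
      by_cases hc : (1:Int) > mp
      · rw [if_pos hc, ih 1 63]
        have ha10 : (10:Int) > mp := by omega
        have ha9 : (9:Int) > mp := by omega
        have ha8 : (8:Int) > mp := by omega
        have ha7 : (7:Int) > mp := by omega
        have ha6 : (6:Int) > mp := by omega
        have ha5 : (5:Int) > mp := by omega
        have ha4 : (4:Int) > mp := by omega
        have ha3 : (3:Int) > mp := by omega
        have ha2 : (2:Int) > mp := by omega
        simp [pvSel, List.mem_cons, ha10, ha9, ha8, ha7, ha6, ha5, ha4, ha3, ha2, hc]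
      · rw [if_neg hc, ih mp wc]
        have hb0 : ¬((0:Int) > mp) := by omega
        simp [pvSel, List.mem_cons, hb0, hc]
    by_cases h61 : c = 61
    · subst h61
      have hstep : pvStep (mp, wc) 61 = if 0 > mp then ((0:Int), 61) else (mp, wc) := by
        rw [pvStep, show pvPriority.contains 61 = true from rfl,
            show pvPriority.getD 61 0 = 0 from rfl]
        simp
      rw [List.foldl_cons, hstep]
      by_cases hc : (0:Int) > mp
      · rw [if_pos hc, ih 0 61]
        have ha10 : (10:Int) > mp := by omega
        have ha9 : (9:Int) > mp := by omega
        have ha8 : (8:Int) > mp := by omega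
        have ha7 : (7:Int) > mp := by omega
        have ha6 : (6:Int) > mp := by omega
        have ha5 : (5:Int) > mp := by omega
        have ha4 : (4:Int) > mp := by omega
        have ha3 : (3:Int) > mp := by omega
        have ha2 : (2:Int) > mp := by omega
        have ha1 : (1:Int) > mp := by omega
        simp [pvSel, List.mem_cons, ha10, ha9, ha8, ha7, ha6, ha5, ha4, ha3, ha2, ha1, hc]
      · rw [if_neg hc, ih mp wc]
        simp [pvSel, List.mem_cons,  hc]
    -- c is none of the known codes: the loop body is a no-op
    have hstep : pvStep (mp, wc) c = (mp, wc) := by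
      have hcont : pvPriority.contains c = false := by
        rw [show pvPriority = PySem.Dict.mk [(99,10),(96,9),(95,8),(82,7),(81,6),(80,5),(67,4),(66,3),(65,2),(63,1),(61,0)] from rfl]
        simp [Ne.symm h99, Ne.symm h96, Ne.symm h95, Ne.symm h82, Ne.symm h81, Ne.symm h80, Ne.symm h67, Ne.symm h66, Ne.symm h65, Ne.symm h63, Ne.symm h61]
      simp [pvStep, hcont]
    rw [List.foldl_cons, hstep, ih mp wc]
    simp [pvSel, List.mem_cons, Ne.symm h99, Ne.symm h96, Ne.symm h95, Ne.symm h82, Ne.symm h81, Ne.symm h80, Ne.symm h67, Ne.symm h66, Ne.symm h65, Ne.symm h63, Ne.symm h61]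

lemma pv_A_char (codes : List Int) :
    get_worst_weather_code codes =
      pvSel codes (-1) (if PySem.List.len codes > 0 then PySem.List.pyGetD codes 0 0 else 0) := by
  rw [get_worst_weather_code]
  exact pvLoop_sel codes (-1) _

lemma pv_B_char (codes : List Int) :
    get_worst_weather_code_alt codes =
      pvSel codes (-1) (if PySem.List.len codes > 0 then PySem.List.pyGetD codes 0 0 else 0) := by
  by_cases m99 : (99:Int) ∈ codes
  · simp [get_worst_weather_code_alt, List.find?, pysem, pvSel, m99]
  by_cases m96 : (96:Int) ∈ codes
  · simp [get_worst_weather_code_alt, List.find?, pysem, pvSel, m96, m99]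
  by_cases m95 : (95:Int) ∈ codes
  · simp [get_worst_weather_code_alt, List.find?, pysem, pvSel, m95, m99, m96]
  by_cases m82 : (82:Int) ∈ codes
  · simp [get_worst_weather_code_alt, List.find?, pysem, pvSel, m82, m99, m96, m95]
  by_cases m81 : (81:Int) ∈ codes
  · simp [get_worst_weather_code_alt, List.find?, pysem, pvSel, m81, m99, m96, m95, m82]
  by_cases m80 : (80:Int) ∈ codes
  · simp [get_worst_weather_code_alt, List.find?, pysem, pvSel, m80, m99, m96, m95, m82, m81]
  by_cases m67 : (67:Int) ∈ codes
  · simp [get_worst_weather_code_alt, List.find?, pysem, pvSel, m67, m99, m96, m95, m82, m81, m80]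
  by_cases m66 : (66:Int) ∈ codes
  · simp [get_worst_weather_code_alt, List.find?, pysem, pvSel, m66, m99, m96, m95, m82, m81, m80, m67]
  by_cases m65 : (65:Int) ∈ codes
  · simp [get_worst_weather_code_alt, List.find?, pysem, pvSel, m65, m99, m96, m95, m82, m81, m80, m67, m66]
  by_cases m63 : (63:Int) ∈ codes
  · simp [get_worst_weather_code_alt, List.find?, pysem, pvSel, m63, m99, m96, m95, m82, m81, m80, m67, m66, m65]
  by_cases m61 : (61:Int) ∈ codes
  · simp [get_worst_weather_code_alt, List.find?, pysem, pvSel, m61, m99, m96, m95, m82, m81, m80, m67, m66, m65, m63]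
  cases codes with
  | nil => simp [get_worst_weather_code_alt, List.find?, pysem, pvSel]
  | cons c cs =>
    simp_all [get_worst_weather_code_alt, List.find?, pysem, pvSel, PySem.List.len, PySem.List.pyGetD]

-- ===== VERDICT (by name: the statement is the Claim_ definition above) =====
theorem get_worst_weather_code_spec : Claim_equal_get_worst_weather_code := by
  intro codes _
  unfold Spec_get_worst_weather_code
  rw [pv_A_char, pv_B_char]
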